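-- pv_equiv track=rewrite | github.com/yushao12/auto-template | convert_to_amazon.py | simplify_model_name
-- ===== SOURCE A (Python) =====
-- def simplify_model_name(size):
--     """简化型号名称"""
--     # 移除所有空格
--     size = size.replace(' ', '')
--
--     # 常见型号的简化规则
--     replacements = {
--         'iPhone': 'IP',
--         'ProMax': 'PM',
--         'Pro': 'P',
--         'Plus': '+',
--     }
--
--     for full, short in replacements.items():
--         size = size.replace(full, short)
--
--     return size
-- ===== SOURCE B (Python) =====
-- def simplify_model_name(size):
--     """简化型号名称 — single left-to-right scan instead of four chained replace passes"""
--     s = size.replace(' ', '')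
--     out = []
--     i = 0
--     n = len(s)
--     while i < n:
--         if s.startswith('iPhone', i):
--             out.append('IP'); i += 6
--         elif s.startswith('ProMax', i):
--             out.append('PM'); i += 6
--         elif s.startswith('Pro', i):
--             out.append('P'); i += 3
--         elif s.startswith('Plus', i):
--             out.append('+'); i += 4
--         else:
--             out.append(s[i]); i += 1
--     return ''.join(out)
-- ===== Notes on version B (the rewrite author's own statement) =====
-- stated objective: alternative
-- what changed: Replaces A's four sequential full-string .replace passes by a single left-to-right scan that tries the keys longest-first at each position and emits either an abbreviation or the current character.
-- intended difference: On despaced inputs containing 'iPhonero', 'iPhonelus' or 'Prolus', A's chained passes let a replacement's output ('IP' or 'P') merge with following literal text into a new 'Pro'/'ProMax'/'Plus' occurrence and abbreviate it too (e.g. A('iPhonero')='IP', losing the 'ro'), while B returns 'IPro', abbreviating only occurrences present in the input, which is the intended behaviour. — e.g. on simplify_model_name("iPhonero"): A returns "IP", B returns "IPro"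
import Mathlib
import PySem

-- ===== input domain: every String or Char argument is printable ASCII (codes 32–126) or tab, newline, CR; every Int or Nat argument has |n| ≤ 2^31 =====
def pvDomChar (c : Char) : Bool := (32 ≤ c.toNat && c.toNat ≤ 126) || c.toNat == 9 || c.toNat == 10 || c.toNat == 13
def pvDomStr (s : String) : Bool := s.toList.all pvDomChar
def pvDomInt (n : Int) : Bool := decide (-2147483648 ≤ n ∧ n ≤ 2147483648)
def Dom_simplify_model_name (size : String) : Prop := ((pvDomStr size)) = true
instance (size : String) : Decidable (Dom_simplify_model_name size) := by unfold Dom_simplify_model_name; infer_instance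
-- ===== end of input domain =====

-- B replaces A's four chained .replace passes by one left-to-right longest-key-first scan;
-- outside D_ below the results coincide, the witness "iPhonero" shows the stated intended difference.

-- ===== PORT A =====
def simplify_model_name (size : String) : String :=
  List.foldl (fun s (p : String × String) => PySem.Str.replace s p.1 p.2)
    (PySem.Str.replace size " " "")
    [("iPhone", "IP"), ("ProMax", "PM"), ("Pro", "P"), ("Plus", "+")]

-- ===== PORT B =====
-- Source B's index loop over the despaced string, as recursion on its characters;
-- the fuel argument is the loop bound n = len(s) of Source B (never exhausted, since every step consumes ≥ 1 char)
def pvScanF (fuel : Nat) (s : List Char) : List Char :=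
  match fuel, s with
  | _, [] => []
  | 0, _ => []
  | n + 1, c :: t =>
    if PySem.Chars.startswith (c :: t) "iPhone".toList then
      "IP".toList ++ pvScanF n ((c :: t).drop 6)
    else if PySem.Chars.startswith (c :: t) "ProMax".toList then
      "PM".toList ++ pvScanF n ((c :: t).drop 6)
    else if PySem.Chars.startswith (c :: t) "Pro".toList then
      "P".toList ++ pvScanF n ((c :: t).drop 3)
    else if PySem.Chars.startswith (c :: t) "Plus".toList then
      "+".toList ++ pvScanF n ((c :: t).drop 4)
    else
      c :: pvScanF n t

def simplify_model_name_alt (size : String) : String :=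
  String.ofList (pvScanF (PySem.Str.replace size " " "").toList.length (PySem.Str.replace size " " "").toList)

-- ===== PRECONDITION & SPEC =====
-- On despaced inputs containing 'iPhonero', 'iPhonelus' or 'Prolus', A's chained passes let a
-- replacement's output ('IP' or 'P') merge with following literal text into a new 'Pro'/'ProMax'/'Plus'
-- occurrence and abbreviate it too (A('iPhonero') = 'IP'), while B abbreviates only occurrences present
-- in the input (B('iPhonero') = 'IPro'), which is the intended behaviour.
def D_simplify_model_name (size : String) : Prop :=
  PySem.Str.isIn "iPhonero" (PySem.Str.replace size " " "") = true ∨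
  PySem.Str.isIn "iPhonelus" (PySem.Str.replace size " " "") = true ∨
  PySem.Str.isIn "Prolus" (PySem.Str.replace size " " "") = true
instance (size : String) : Decidable (D_simplify_model_name size) := by
  unfold D_simplify_model_name; infer_instance

def Spec_simplify_model_name (size : String) (out : String) : Prop :=
  ¬ D_simplify_model_name size → out = simplify_model_name_alt size
instance (size : String) (out : String) : Decidable (Spec_simplify_model_name size out) := by
  unfold Spec_simplify_model_name; infer_instance

def pvDiffWitness_simplify_model_name : String := "iPhonero"
def pvDiffWitnessOut_simplify_model_name : String × String := ("IP", "IPro")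

-- ===== CLAIM (what is proved, stated in full; the proofs are below) =====
def Claim_unchanged_simplify_model_name : Prop :=
  ∀ (size : String), Dom_simplify_model_name size →
    Spec_simplify_model_name size (simplify_model_name size)
def Claim_changed_simplify_model_name : Prop :=
  Dom_simplify_model_name (pvDiffWitness_simplify_model_name) ∧
  D_simplify_model_name (pvDiffWitness_simplify_model_name) ∧
  simplify_model_name (pvDiffWitness_simplify_model_name) = pvDiffWitnessOut_simplify_model_name.1 ∧
  simplify_model_name_alt (pvDiffWitness_simplify_model_name) = pvDiffWitnessOut_simplify_model_name.2 ∧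
  pvDiffWitnessOut_simplify_model_name.1 ≠ pvDiffWitnessOut_simplify_model_name.2

def Claim_exact_simplify_model_name : Prop :=
  ∀ (size : String), Dom_simplify_model_name size → D_simplify_model_name size →
    simplify_model_name size ≠ simplify_model_name_alt size

-- ===== LEMMAS AND PROOFS =====

-- clean recursion computing PySem.Chars.replace for a nonempty pattern
def pvRep (k v : List Char) (s : List Char) : List Char :=
  match s with
  | [] => []
  | c :: t =>
    if k <+: (c :: t) then v ++ pvRep k v (t.drop (k.length - 1))
    else c :: pvRep k v t
termination_by s.length
decreasing_by all_goals (simp; try omega)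

theorem pvRep_nil (k v : List Char) : pvRep k v [] = [] := by simp [pvRep]

theorem pvRep_pos (k v : List Char) (hk : k ≠ []) {s : List Char} (h : k <+: s) :
    pvRep k v s = v ++ pvRep k v (s.drop k.length) := by
  cases s with
  | nil => cases h with | intro w hw => exact absurd (List.append_eq_nil_iff.mp hw).1 hk
  | cons c t =>
    rw [pvRep]
    have hlen : k.length = (k.length - 1) + 1 := by
      cases k with
      | nil => exact absurd rfl hk
      | cons a b => simp
    rw [if_pos h, hlen, List.drop_succ_cons]
    simp

theorem pvRep_neg (k v : List Char) {c : Char} {t : List Char} (h : ¬ k <+: (c :: t)) :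
    pvRep k v (c :: t) = c :: pvRep k v t := by
  rw [pvRep]; simp [h]

theorem pvGo_spec (k v : List Char) (hk : k ≠ []) :
    ∀ (fuel : Nat) (l acc : List Char), l.length ≤ fuel →
      PySem.Chars.replace.go k v fuel l acc = acc.reverse ++ pvRep k v l := by
  intro fuel
  induction fuel with
  | zero =>
    intro l acc hl
    have : l = [] := List.length_eq_zero_iff.mp (Nat.le_zero.mp hl)
    subst this; simp [PySem.Chars.replace.go, pvRep_nil]
  | succ n ih =>
    intro l acc hl
    cases l with
    | nil => simp [PySem.Chars.replace.go, pvRep_nil]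
    | cons c t =>
      rw [PySem.Chars.replace.go]
      have hl' : t.length + 1 ≤ n + 1 := by simpa using hl
      by_cases h : k.isPrefixOf (c :: t)
      · have hpre : k <+: (c :: t) := List.isPrefixOf_iff_prefix.mp h
        have hklen : 1 ≤ k.length := by
          cases k with
          | nil => exact absurd rfl hk
          | cons a b => simp
        rw [if_pos h, ih _ _ (by simp [List.length_drop]; omega), pvRep_pos k v hk hpre]
        simp
      · have hpre : ¬ k <+: (c :: t) := fun hp => h (List.isPrefixOf_iff_prefix.mpr hp)
        rw [if_neg h, ih _ _ (by omega), pvRep_neg k v hpre]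
        simp

theorem pvReplace_eq_pvRep (k v s : List Char) (hk : k ≠ []) :
    PySem.Chars.replace s k v = pvRep k v s := by
  rw [PySem.Chars.replace]
  rw [if_neg (by simp [List.isEmpty_iff, hk])]
  simpa using pvGo_spec k v hk s.length s [] le_rfl

-- a prefix pattern avoiding the heads of key and value passes through pvRep unchanged
theorem pvRep_prefix_iff (k v : List Char) (kh vh : Char)
    (hk : k.head? = some kh) (hv : v.head? = some vh) :
    ∀ (n : Nat) (s p : List Char), s.length ≤ n → (∀ c ∈ p, c ≠ kh ∧ c ≠ vh) →
      (p <+: pvRep k v s ↔ p <+: s) := by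
  intro n
  induction n with
  | zero =>
    intro s p hs _
    have : s = [] := List.length_eq_zero_iff.mp (Nat.le_zero.mp hs)
    subst this; rw [pvRep_nil]
  | succ n ih =>
    intro s p hs hp
    cases s with
    | nil => rw [pvRep_nil]
    | cons c t =>
      have hkne : k ≠ [] := by cases k <;> simp_all
      by_cases h : k <+: (c :: t)
      · rw [pvRep_pos k v hkne h]
        cases p with
        | nil => simp
        | cons b q =>
          have hb : b ≠ kh ∧ b ≠ vh := hp b (by simp)
          constructor
          · intro hpre
            cases v with
            | nil => simp at hv
            | cons v0 v' =>
              have : b = v0 := (List.cons_prefix_cons.mp hpre).1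
              have : v0 = vh := by simpa using hv
              simp_all
          · intro hpre
            cases k with
            | nil => exact absurd rfl hkne
            | cons k0 k' =>
              have hc : k0 = c := (List.cons_prefix_cons.mp h).1
              have hb2 : b = c := (List.cons_prefix_cons.mp hpre).1
              have : k0 = kh := by simpa using hk
              simp_all
      · rw [pvRep_neg k v h]
        cases p with
        | nil => simp
        | cons b q =>
          rw [List.cons_prefix_cons, List.cons_prefix_cons]
          have hq := ih t q (by simp at hs ⊢; omega) (fun c hc => hp c (by simp [hc]))
          tauto

-- pvRep skips a block containing no head-of-key character
theorem pvRep_skip (k v : List Char) (kh : Char) (hk : k.head? = some kh) :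
    ∀ (x t : List Char), (∀ c ∈ x, c ≠ kh) →
      pvRep k v (x ++ t) = x ++ pvRep k v t := by
  intro x
  induction x with
  | nil => intro t _; simp
  | cons c x' ih =>
    intro t hx
    have hnp : ¬ k <+: (c :: (x' ++ t)) := by
      intro h
      cases k with
      | nil => simp at hk
      | cons k0 k' =>
        have : k0 = c := (List.cons_prefix_cons.mp h).1
        have : k0 = kh := by simpa using hk
        exact hx c (by simp) (by simp_all)
    rw [List.cons_append, pvRep_neg k v hnp, ih t (fun c hc => hx c (by simp [hc]))]
    simp

theorem pvSwFalse {s p : List Char} (h : ¬ p <+: s) : PySem.Chars.startswith s p = false := by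
  rw [← Bool.not_eq_true, PySem.Chars.startswith_iff]; exact h

-- pattern-transfer instances for the three replacement passes
theorem pvP1 (p s : List Char) (hp : ∀ c ∈ p, c ≠ 'i' ∧ c ≠ 'I') :
    p <+: pvRep ['i','P','h','o','n','e'] ['I','P'] s ↔ p <+: s :=
  pvRep_prefix_iff _ _ 'i' 'I' rfl rfl s.length s p le_rfl hp

theorem pvP2 (p s : List Char) (hp : ∀ c ∈ p, c ≠ 'P') :
    p <+: pvRep ['P','r','o','M','a','x'] ['P','M'] s ↔ p <+: s :=
  pvRep_prefix_iff _ _ 'P' 'P' rfl rfl s.length s p le_rfl (fun c hc => ⟨hp c hc, hp c hc⟩)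

theorem pvP3 (p s : List Char) (hp : ∀ c ∈ p, c ≠ 'P') :
    p <+: pvRep ['P','r','o'] ['P'] s ↔ p <+: s :=
  pvRep_prefix_iff _ _ 'P' 'P' rfl rfl s.length s p le_rfl (fun c hc => ⟨hp c hc, hp c hc⟩)

theorem pvEiPhone : "iPhone".toList = ['i','P','h','o','n','e'] := rfl
theorem pvEProMax : "ProMax".toList = ['P','r','o','M','a','x'] := rfl
theorem pvEPro : "Pro".toList = ['P','r','o'] := rfl
theorem pvEPlus : "Plus".toList = ['P','l','u','s'] := rfl
theorem pvEIP : "IP".toList = ['I','P'] := rfl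
theorem pvEPM : "PM".toList = ['P','M'] := rfl
theorem pvEP : "P".toList = ['P'] := rfl
theorem pvEplus : "+".toList = ['+'] := rfl

-- the three cascade patterns and the composed four-pass replacement
def pvB1 : List Char := ['i','P','h','o','n','e','r','o']
def pvB2 : List Char := ['i','P','h','o','n','e','l','u','s']
def pvB3 : List Char := ['P','r','o','l','u','s']

def pvC (w : List Char) : List Char :=
  pvRep ['P','l','u','s'] ['+']
    (pvRep ['P','r','o'] ['P']
      (pvRep ['P','r','o','M','a','x'] ['P','M']
        (pvRep ['i','P','h','o','n','e'] ['I','P'] w)))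

def pvP0 (w : List Char) : Prop := pvB1 <+: w ∨ pvB2 <+: w ∨ pvB3 <+: w

theorem pvInfixDrop {b s : List Char} : (b <:+: s) ↔ ∃ j, b <+: s.drop j := by
  rw [← PySem.Chars.isIn_iff_infix, ← PySem.Chars.exists_prefix_drop_iff_isIn]

theorem pvInfixShift {b t : List Char} (x : List Char)
    (hj : ∀ j, j < x.length → ¬ b <+: (x.drop j ++ t)) (h : b <:+: (x ++ t)) : b <:+: t := by
  obtain ⟨j, hpre⟩ := pvInfixDrop.mp h
  rw [List.drop_append] at hpre
  by_cases hlt : j < x.length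
  · rw [Nat.sub_eq_zero_of_le hlt.le, List.drop_zero] at hpre
    exact absurd hpre (hj j hlt)
  · rw [List.drop_eq_nil_of_le (by omega), List.nil_append] at hpre
    exact pvInfixDrop.mpr ⟨j - x.length, hpre⟩

-- the scanner copies a block whose characters start no key
theorem pvScanCopy : ∀ (x : List Char), (∀ c ∈ x, c ≠ 'i' ∧ c ≠ 'P') →
    ∀ (n : Nat) (t : List Char), pvScanF (x.length + n) (x ++ t) = x ++ pvScanF n t := by
  intro x
  induction x with
  | nil => intro _ n t; simp
  | cons c x' ih =>
    intro hx n t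
    have hc := hx c (by simp)
    have hfuel : (c::x').length + n = (x'.length + n) + 1 := by
      simp only [List.length_cons]; omega
    have e : pvScanF ((x'.length + n) + 1) (c::(x'++t)) = c :: pvScanF (x'.length + n) (x'++t) := by
      simp [pvScanF,
        pvSwFalse (show ¬ (['i','P','h','o','n','e'] <+: c::(x'++t)) from
          fun h => hc.1 (List.cons_prefix_cons.mp h).1.symm),
        pvSwFalse (show ¬ (['P','r','o','M','a','x'] <+: c::(x'++t)) from
          fun h => hc.2 (List.cons_prefix_cons.mp h).1.symm),
        pvSwFalse (show ¬ (['P','r','o'] <+: c::(x'++t)) from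
          fun h => hc.2 (List.cons_prefix_cons.mp h).1.symm),
        pvSwFalse (show ¬ (['P','l','u','s'] <+: c::(x'++t)) from
          fun h => hc.2 (List.cons_prefix_cons.mp h).1.symm)]
    simp only [List.cons_append, hfuel]
    rw [e, ih (fun d hd => hx d (by simp [hd])) n t]

-- one step of both programs: off the cascade patterns they consume the same front and emit the same output
theorem pvDecomp : ∀ (w : List Char), w ≠ [] → ¬ pvP0 w →
    ∃ (o t : List Char),
      t.length < w.length ∧ t <:+ w ∧
      pvC w = o ++ pvC t ∧
      (∀ m : Nat, pvScanF (m + 1) w = o ++ pvScanF m t) ∧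
      (pvB1 <:+: w → pvB1 <:+: t) ∧ (pvB2 <:+: w → pvB2 <:+: t) ∧
      (pvB3 <:+: w → pvB3 <:+: t) := by
  intro w hne hP0
  by_cases hp1 : ['i','P','h','o','n','e'] <+: w
  · obtain ⟨t, rfl⟩ := hp1
    have hro : ¬ (['r','o'] <+: t) := by
      intro h; obtain ⟨u, rfl⟩ := h
      exact hP0 (Or.inl ⟨u, by simp [pvB1]⟩)
    have hlus : ¬ (['l','u','s'] <+: t) := by
      intro h; obtain ⟨u, rfl⟩ := h
      exact hP0 (Or.inr (Or.inl ⟨u, by simp [pvB2]⟩))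
    refine ⟨['I','P'], t,
      by simp only [List.length_append, List.length_cons, List.length_nil]; omega,
      ⟨['i','P','h','o','n','e'], rfl⟩, ?_, ?_, ?_, ?_, ?_⟩
    · unfold pvC
      rw [pvRep_pos ['i','P','h','o','n','e'] ['I','P'] (by simp) ⟨t, rfl⟩, List.drop_left]
      simp only [List.cons_append, List.nil_append]
      set X := pvRep ['i','P','h','o','n','e'] ['I','P'] t with hX
      have hXro : ¬ (['r','o'] <+: X) := fun h => hro ((pvP1 _ _ (by simp)).mp h)
      have hXlus : ¬ (['l','u','s'] <+: X) := fun h => hlus ((pvP1 _ _ (by simp)).mp h)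
      have hXroMax : ¬ (['r','o','M','a','x'] <+: X) := fun h =>
        hro ((show ['r','o'] <+: ['r','o','M','a','x'] by simp).trans ((pvP1 _ _ (by simp)).mp h))
      rw [pvRep_neg _ _ (show ¬ (['P','r','o','M','a','x'] <+: 'I'::'P'::X) by
            simp [List.cons_prefix_cons]),
          pvRep_neg _ _ (show ¬ (['P','r','o','M','a','x'] <+: 'P'::X) from
            fun h => hXroMax (List.cons_prefix_cons.mp h).2)]
      set Y := pvRep ['P','r','o','M','a','x'] ['P','M'] X with hY
      have hYro : ¬ (['r','o'] <+: Y) := fun h => hXro ((pvP2 _ _ (by simp)).mp h)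
      have hYlus : ¬ (['l','u','s'] <+: Y) := fun h => hXlus ((pvP2 _ _ (by simp)).mp h)
      rw [pvRep_neg _ _ (show ¬ (['P','r','o'] <+: 'I'::'P'::Y) by simp [List.cons_prefix_cons]),
          pvRep_neg _ _ (show ¬ (['P','r','o'] <+: 'P'::Y) from
            fun h => hYro (List.cons_prefix_cons.mp h).2)]
      set Z := pvRep ['P','r','o'] ['P'] Y with hZ
      have hZlus : ¬ (['l','u','s'] <+: Z) := fun h => hYlus ((pvP3 _ _ (by simp)).mp h)
      rw [pvRep_neg _ _ (show ¬ (['P','l','u','s'] <+: 'I'::'P'::Z) by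
            simp [List.cons_prefix_cons]),
          pvRep_neg _ _ (show ¬ (['P','l','u','s'] <+: 'P'::Z) from
            fun h => hZlus (List.cons_prefix_cons.mp h).2)]
    · intro m
      simp only [List.cons_append, List.nil_append]
      simp [pvScanF, PySem.Chars.startswith, pvEiPhone, pvEIP, List.isPrefixOf]
    · refine fun h => pvInfixShift ['i','P','h','o','n','e'] ?_ h
      intro j hj
      simp only [List.length_cons, List.length_nil] at hj
      interval_cases j
      · exact fun hp => hP0 (Or.inl hp)
      all_goals simp [pvB1, List.cons_prefix_cons]
    · refine fun h => pvInfixShift ['i','P','h','o','n','e'] ?_ h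
      intro j hj
      simp only [List.length_cons, List.length_nil] at hj
      interval_cases j
      · exact fun hp => hP0 (Or.inr (Or.inl hp))
      all_goals simp [pvB2, List.cons_prefix_cons]
    · refine fun h => pvInfixShift ['i','P','h','o','n','e'] ?_ h
      intro j hj
      simp only [List.length_cons, List.length_nil] at hj
      interval_cases j <;> simp [pvB3, List.cons_prefix_cons]
  · by_cases hp2 : ['P','r','o','M','a','x'] <+: w
    · obtain ⟨t, rfl⟩ := hp2
      refine ⟨['P','M'], t,
        by simp only [List.length_append, List.length_cons, List.length_nil]; omega,
        ⟨['P','r','o','M','a','x'], rfl⟩, ?_, ?_, ?_, ?_, ?_⟩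
      · unfold pvC
        rw [pvRep_skip ['i','P','h','o','n','e'] ['I','P'] 'i' rfl ['P','r','o','M','a','x'] t (by simp)]
        set X := pvRep ['i','P','h','o','n','e'] ['I','P'] t with hX
        rw [pvRep_pos ['P','r','o','M','a','x'] ['P','M'] (by simp) ⟨X, rfl⟩, List.drop_left]
        simp only [List.cons_append, List.nil_append]
        set Y := pvRep ['P','r','o','M','a','x'] ['P','M'] X with hY
        rw [pvRep_neg _ _ (show ¬ (['P','r','o'] <+: 'P'::'M'::Y) by simp [List.cons_prefix_cons]),
            pvRep_neg _ _ (show ¬ (['P','r','o'] <+: 'M'::Y) by simp [List.cons_prefix_cons])]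
        set Z := pvRep ['P','r','o'] ['P'] Y with hZ
        rw [pvRep_neg _ _ (show ¬ (['P','l','u','s'] <+: 'P'::'M'::Z) by simp [List.cons_prefix_cons]),
            pvRep_neg _ _ (show ¬ (['P','l','u','s'] <+: 'M'::Z) by simp [List.cons_prefix_cons])]
      · intro m
        simp only [List.cons_append, List.nil_append]
        simp [pvScanF, PySem.Chars.startswith, pvEiPhone, pvEProMax, pvEPM, List.isPrefixOf]
      · refine fun h => pvInfixShift ['P','r','o','M','a','x'] ?_ h
        intro j hj
        simp only [List.length_cons, List.length_nil] at hj
        interval_cases j <;> simp [pvB1, List.cons_prefix_cons]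
      · refine fun h => pvInfixShift ['P','r','o','M','a','x'] ?_ h
        intro j hj
        simp only [List.length_cons, List.length_nil] at hj
        interval_cases j <;> simp [pvB2, List.cons_prefix_cons]
      · refine fun h => pvInfixShift ['P','r','o','M','a','x'] ?_ h
        intro j hj
        simp only [List.length_cons, List.length_nil] at hj
        interval_cases j <;> simp [pvB3, List.cons_prefix_cons]
    · by_cases hp3 : ['P','r','o'] <+: w
      · obtain ⟨t, rfl⟩ := hp3
        have hMax : ¬ (['M','a','x'] <+: t) := by
          intro h; obtain ⟨u, rfl⟩ := h; exact hp2 ⟨u, by simp⟩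
        have hlus : ¬ (['l','u','s'] <+: t) := by
          intro h; obtain ⟨u, rfl⟩ := h; exact hP0 (Or.inr (Or.inr ⟨u, by simp [pvB3]⟩))
        refine ⟨['P'], t,
          by simp only [List.length_append, List.length_cons, List.length_nil]; omega,
          ⟨['P','r','o'], rfl⟩, ?_, ?_, ?_, ?_, ?_⟩
        · unfold pvC
          rw [pvRep_skip ['i','P','h','o','n','e'] ['I','P'] 'i' rfl ['P','r','o'] t (by simp)]
          set X := pvRep ['i','P','h','o','n','e'] ['I','P'] t with hX
          have hXMax : ¬ (['M','a','x'] <+: X) := fun h => hMax ((pvP1 _ _ (by simp)).mp h)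
          have hXlus : ¬ (['l','u','s'] <+: X) := fun h => hlus ((pvP1 _ _ (by simp)).mp h)
          have e2 : pvRep ['P','r','o','M','a','x'] ['P','M'] (['P','r','o'] ++ X)
              = 'P'::'r'::'o'::pvRep ['P','r','o','M','a','x'] ['P','M'] X := by
            show pvRep ['P','r','o','M','a','x'] ['P','M'] ('P'::'r'::'o'::X) = _
            rw [pvRep_neg _ _ (show ¬ (['P','r','o','M','a','x'] <+: 'P'::'r'::'o'::X) from
                  fun h => hXMax (List.cons_prefix_cons.mp
                    (List.cons_prefix_cons.mp (List.cons_prefix_cons.mp h).2).2).2),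
                pvRep_neg _ _ (show ¬ (['P','r','o','M','a','x'] <+: 'r'::'o'::X) by
                  simp [List.cons_prefix_cons]),
                pvRep_neg _ _ (show ¬ (['P','r','o','M','a','x'] <+: 'o'::X) by
                  simp [List.cons_prefix_cons])]
          rw [e2]
          set Y := pvRep ['P','r','o','M','a','x'] ['P','M'] X with hY
          have hYlus : ¬ (['l','u','s'] <+: Y) := fun h => hXlus ((pvP2 _ _ (by simp)).mp h)
          have e3 : pvRep ['P','r','o'] ['P'] ('P'::'r'::'o'::Y) = 'P'::pvRep ['P','r','o'] ['P'] Y := by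
            rw [pvRep_pos ['P','r','o'] ['P'] (by simp)
                  (show ['P','r','o'] <+: 'P'::'r'::'o'::Y from ⟨Y, rfl⟩)]
            simp
          rw [e3]
          set Z := pvRep ['P','r','o'] ['P'] Y with hZ
          have hZlus : ¬ (['l','u','s'] <+: Z) := fun h => hYlus ((pvP3 _ _ (by simp)).mp h)
          rw [pvRep_neg _ _ (show ¬ (['P','l','u','s'] <+: 'P'::Z) from
                fun h => hZlus (List.cons_prefix_cons.mp h).2)]
          simp
        · intro m
          simp only [List.cons_append, List.nil_append]
          have s1 : PySem.Chars.startswith ('P'::'r'::'o'::t) ['i','P','h','o','n','e'] = false :=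
            pvSwFalse (by simp [List.cons_prefix_cons])
          have s2 : PySem.Chars.startswith ('P'::'r'::'o'::t) ['P','r','o','M','a','x'] = false :=
            pvSwFalse (fun h => hMax (List.cons_prefix_cons.mp
                (List.cons_prefix_cons.mp (List.cons_prefix_cons.mp h).2).2).2)
          have s3 : PySem.Chars.startswith ('P'::'r'::'o'::t) ['P','r','o'] = true :=
            (PySem.Chars.startswith_iff _ _).mpr ⟨t, rfl⟩
          simp [pvScanF, s1, s2, s3, pvEP]
        · refine fun h => pvInfixShift ['P','r','o'] ?_ h
          intro j hj
          simp only [List.length_cons, List.length_nil] at hj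
          interval_cases j <;> simp [pvB1, List.cons_prefix_cons]
        · refine fun h => pvInfixShift ['P','r','o'] ?_ h
          intro j hj
          simp only [List.length_cons, List.length_nil] at hj
          interval_cases j <;> simp [pvB2, List.cons_prefix_cons]
        · refine fun h => pvInfixShift ['P','r','o'] ?_ h
          intro j hj
          simp only [List.length_cons, List.length_nil] at hj
          interval_cases j
          · exact fun hp => hP0 (Or.inr (Or.inr hp))
          all_goals simp [pvB3, List.cons_prefix_cons]
      · by_cases hp4 : ['P','l','u','s'] <+: w
        · obtain ⟨t, rfl⟩ := hp4
          refine ⟨['+'], t,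
            by simp only [List.length_append, List.length_cons, List.length_nil]; omega,
            ⟨['P','l','u','s'], rfl⟩, ?_, ?_, ?_, ?_, ?_⟩
          · unfold pvC
            rw [pvRep_skip ['i','P','h','o','n','e'] ['I','P'] 'i' rfl ['P','l','u','s'] t (by simp)]
            set X := pvRep ['i','P','h','o','n','e'] ['I','P'] t with hX
            have e2 : pvRep ['P','r','o','M','a','x'] ['P','M'] (['P','l','u','s'] ++ X)
                = 'P'::'l'::'u'::'s'::pvRep ['P','r','o','M','a','x'] ['P','M'] X := by
              show pvRep ['P','r','o','M','a','x'] ['P','M'] ('P'::'l'::'u'::'s'::X) = _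
              rw [pvRep_neg _ _ (show ¬ (['P','r','o','M','a','x'] <+: 'P'::'l'::'u'::'s'::X) by
                    simp [List.cons_prefix_cons]),
                  pvRep_neg _ _ (show ¬ (['P','r','o','M','a','x'] <+: 'l'::'u'::'s'::X) by
                    simp [List.cons_prefix_cons]),
                  pvRep_neg _ _ (show ¬ (['P','r','o','M','a','x'] <+: 'u'::'s'::X) by
                    simp [List.cons_prefix_cons]),
                  pvRep_neg _ _ (show ¬ (['P','r','o','M','a','x'] <+: 's'::X) by
                    simp [List.cons_prefix_cons])]
            rw [e2]
            set Y := pvRep ['P','r','o','M','a','x'] ['P','M'] X with hY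
            have e3 : pvRep ['P','r','o'] ['P'] ('P'::'l'::'u'::'s'::Y)
                = 'P'::'l'::'u'::'s'::pvRep ['P','r','o'] ['P'] Y := by
              rw [pvRep_neg _ _ (show ¬ (['P','r','o'] <+: 'P'::'l'::'u'::'s'::Y) by
                    simp [List.cons_prefix_cons]),
                  pvRep_neg _ _ (show ¬ (['P','r','o'] <+: 'l'::'u'::'s'::Y) by
                    simp [List.cons_prefix_cons]),
                  pvRep_neg _ _ (show ¬ (['P','r','o'] <+: 'u'::'s'::Y) by
                    simp [List.cons_prefix_cons]),
                  pvRep_neg _ _ (show ¬ (['P','r','o'] <+: 's'::Y) by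
                    simp [List.cons_prefix_cons])]
            rw [e3]
            set Z := pvRep ['P','r','o'] ['P'] Y with hZ
            rw [pvRep_pos ['P','l','u','s'] ['+'] (by simp)
                  (show ['P','l','u','s'] <+: 'P'::'l'::'u'::'s'::Z from ⟨Z, rfl⟩)]
            simp
          · intro m
            simp only [List.cons_append, List.nil_append]
            simp [pvScanF, PySem.Chars.startswith, pvEiPhone, pvEProMax, pvEPro, pvEPlus, pvEplus,
              List.isPrefixOf]
          · refine fun h => pvInfixShift ['P','l','u','s'] ?_ h
            intro j hj
            simp only [List.length_cons, List.length_nil] at hj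
            interval_cases j <;> simp [pvB1, List.cons_prefix_cons]
          · refine fun h => pvInfixShift ['P','l','u','s'] ?_ h
            intro j hj
            simp only [List.length_cons, List.length_nil] at hj
            interval_cases j <;> simp [pvB2, List.cons_prefix_cons]
          · refine fun h => pvInfixShift ['P','l','u','s'] ?_ h
            intro j hj
            simp only [List.length_cons, List.length_nil] at hj
            interval_cases j <;> simp [pvB3, List.cons_prefix_cons]
        · rcases w with _ | ⟨c, t⟩
          · exact absurd rfl hne
          · refine ⟨[c], t, by simp, ⟨[c], rfl⟩, ?_, ?_, ?_, ?_, ?_⟩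
            · unfold pvC
              rw [pvRep_neg _ _ hp1]
              set X := pvRep ['i','P','h','o','n','e'] ['I','P'] t with hX
              rw [pvRep_neg _ _ (show ¬ (['P','r','o','M','a','x'] <+: c::X) from
                    fun h => hp2 (List.cons_prefix_cons.mpr
                      ⟨(List.cons_prefix_cons.mp h).1,
                       (pvP1 _ _ (by simp)).mp (List.cons_prefix_cons.mp h).2⟩))]
              set Y := pvRep ['P','r','o','M','a','x'] ['P','M'] X with hY
              rw [pvRep_neg _ _ (show ¬ (['P','r','o'] <+: c::Y) from
                    fun h => hp3 (List.cons_prefix_cons.mpr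
                      ⟨(List.cons_prefix_cons.mp h).1,
                       (pvP1 _ _ (by simp)).mp ((pvP2 _ _ (by simp)).mp
                         (List.cons_prefix_cons.mp h).2)⟩))]
              set Z := pvRep ['P','r','o'] ['P'] Y with hZ
              rw [pvRep_neg _ _ (show ¬ (['P','l','u','s'] <+: c::Z) from
                    fun h => hp4 (List.cons_prefix_cons.mpr
                      ⟨(List.cons_prefix_cons.mp h).1,
                       (pvP1 _ _ (by simp)).mp ((pvP2 _ _ (by simp)).mp
                         ((pvP3 _ _ (by simp)).mp (List.cons_prefix_cons.mp h).2))⟩))]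
              simp
            · intro m
              simp [pvScanF, pvSwFalse hp1, pvSwFalse hp2, pvSwFalse hp3, pvSwFalse hp4]
            · exact fun h => pvInfixShift [c]
                (by intro j hj
                    simp only [List.length_cons, List.length_nil] at hj
                    interval_cases j
                    exact fun hp => hp1 ((show ['i','P','h','o','n','e'] <+: pvB1 by
                      simp [pvB1]).trans hp)) h
            · exact fun h => pvInfixShift [c]
                (by intro j hj
                    simp only [List.length_cons, List.length_nil] at hj
                    interval_cases j
                    exact fun hp => hp1 ((show ['i','P','h','o','n','e'] <+: pvB2 by
                      simp [pvB2]).trans hp)) h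
            · exact fun h => pvInfixShift [c]
                (by intro j hj
                    simp only [List.length_cons, List.length_nil] at hj
                    interval_cases j
                    exact fun hp => hp3 ((show ['P','r','o'] <+: pvB3 by
                      simp [pvB3]).trans hp)) h

theorem pvMain : ∀ (n : Nat) (w : List Char), w.length ≤ n →
    ¬ (pvB1 <:+: w) → ¬ (pvB2 <:+: w) → ¬ (pvB3 <:+: w) →
    pvC w = pvScanF n w := by
  intro n
  induction n with
  | zero =>
    intro w hw _ _ _
    have : w = [] := List.length_eq_zero_iff.mp (Nat.le_zero.mp hw)
    subst this; simp [pvC, pvRep_nil, pvScanF]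
  | succ n ih =>
    intro w hw h1 h2 h3
    rcases eq_or_ne w [] with rfl | hne
    · simp [pvC, pvRep_nil, pvScanF]
    · have hP0 : ¬ pvP0 w := by
        rintro (h | h | h)
        exacts [h1 h.isInfix, h2 h.isInfix, h3 h.isInfix]
      obtain ⟨o, t, hlt, hsuf, hC, hS, _, _, _⟩ := pvDecomp w hne hP0
      rw [hC, hS n,
          ih t (by omega) (fun hb => h1 (hb.trans hsuf.isInfix))
            (fun hb => h2 (hb.trans hsuf.isInfix)) (fun hb => h3 (hb.trans hsuf.isInfix))]

-- A's chained passes additionally rewrite every cascade occurrence, so on them its output is strictly shorter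
theorem pvLenBoth : ∀ (n : Nat) (w : List Char), w.length ≤ n →
    ((pvC w).length ≤ (pvScanF n w).length ∧
      ((pvB1 <:+: w ∨ pvB2 <:+: w ∨ pvB3 <:+: w) →
        (pvC w).length < (pvScanF n w).length)) := by
  intro n
  induction n using Nat.strong_induction_on with
  | _ n ih =>
    intro w hw
    have hstrict : (pvB1 <:+: w ∨ pvB2 <:+: w ∨ pvB3 <:+: w) →
        (pvC w).length < (pvScanF n w).length := by
      intro hbad
      have hne : w ≠ [] := by
        rintro rfl
        rcases hbad with h | h | h <;> simp [List.infix_nil, pvB1, pvB2, pvB3] at h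
      have hn1 : 1 ≤ n := by
        rcases w with _ | ⟨c, t⟩
        · exact absurd rfl hne
        · simp at hw; omega
      by_cases hb1 : pvB1 <+: w
      · -- 'iPhonero' at the front
        obtain ⟨u, rfl⟩ := hb1
        simp only [pvB1, List.cons_append, List.nil_append] at hw ⊢
        by_cases hMax : ['M','a','x'] <+: u
        · -- the created 'ProMax' fires: A gives 'IPM', B gives 'IProMax'
          obtain ⟨u', rfl⟩ := hMax
          simp only [List.cons_append, List.nil_append] at hw ⊢
          obtain ⟨m', rfl⟩ : ∃ m', n = (5 + m') + 1 := ⟨n - 6, by simp at hw; omega⟩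
          have eC : pvC ('i'::'P'::'h'::'o'::'n'::'e'::'r'::'o'::'M'::'a'::'x'::u')
              = 'I'::'P'::'M'::pvC u' := by
            unfold pvC
            rw [show ('i'::'P'::'h'::'o'::'n'::'e'::'r'::'o'::'M'::'a'::'x'::u')
                  = ['i','P','h','o','n','e'] ++ ('r'::'o'::'M'::'a'::'x'::u') from rfl,
                pvRep_pos ['i','P','h','o','n','e'] ['I','P'] (by simp) ⟨_, rfl⟩, List.drop_left,
                show ('r'::'o'::'M'::'a'::'x'::u') = ['r','o','M','a','x'] ++ u' from rfl,
                pvRep_skip ['i','P','h','o','n','e'] ['I','P'] 'i' rfl ['r','o','M','a','x'] u' (by simp)]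
            simp only [List.cons_append, List.nil_append]
            set X := pvRep ['i','P','h','o','n','e'] ['I','P'] u' with hX
            rw [pvRep_neg _ _ (show ¬ (['P','r','o','M','a','x'] <+: 'I'::'P'::'r'::'o'::'M'::'a'::'x'::X) by
                  simp [List.cons_prefix_cons]),
                show ('P'::'r'::'o'::'M'::'a'::'x'::X) = ['P','r','o','M','a','x'] ++ X from rfl,
                pvRep_pos ['P','r','o','M','a','x'] ['P','M'] (by simp) ⟨X, rfl⟩, List.drop_left]
            simp only [List.cons_append, List.nil_append]
            set Y := pvRep ['P','r','o','M','a','x'] ['P','M'] X with hY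
            rw [pvRep_neg _ _ (show ¬ (['P','r','o'] <+: 'I'::'P'::'M'::Y) by simp [List.cons_prefix_cons]),
                pvRep_neg _ _ (show ¬ (['P','r','o'] <+: 'P'::'M'::Y) by simp [List.cons_prefix_cons]),
                pvRep_neg _ _ (show ¬ (['P','r','o'] <+: 'M'::Y) by simp [List.cons_prefix_cons])]
            set Z := pvRep ['P','r','o'] ['P'] Y with hZ
            rw [pvRep_neg _ _ (show ¬ (['P','l','u','s'] <+: 'I'::'P'::'M'::Z) by simp [List.cons_prefix_cons]),
                pvRep_neg _ _ (show ¬ (['P','l','u','s'] <+: 'P'::'M'::Z) by simp [List.cons_prefix_cons]),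
                pvRep_neg _ _ (show ¬ (['P','l','u','s'] <+: 'M'::Z) by simp [List.cons_prefix_cons])]
          have h1 : pvScanF ((5 + m') + 1) ('i'::'P'::'h'::'o'::'n'::'e'::'r'::'o'::'M'::'a'::'x'::u')
              = 'I'::'P'::pvScanF (5 + m') ('r'::'o'::'M'::'a'::'x'::u') := by
            simp [pvScanF, PySem.Chars.startswith, pvEiPhone, pvEIP, List.isPrefixOf]
          have h2 := pvScanCopy ['r','o','M','a','x'] (by simp) m' u'
          simp only [List.length_cons, List.length_nil, List.cons_append, List.nil_append] at h2
          rw [eC, h1, h2]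
          simp only [List.length_cons]
          have := (ih m' (by omega) u' (by simp at hw; omega)).1
          omega
        · by_cases hlus : ['l','u','s'] <+: u
          · -- the created 'Pro' then 'Plus' fire: A gives 'I+', B gives 'IProlus'
            obtain ⟨u', rfl⟩ := hlus
            simp only [List.cons_append, List.nil_append] at hw ⊢
            obtain ⟨m', rfl⟩ : ∃ m', n = (5 + m') + 1 := ⟨n - 6, by simp at hw; omega⟩
            have eC : pvC ('i'::'P'::'h'::'o'::'n'::'e'::'r'::'o'::'l'::'u'::'s'::u')
                = 'I'::'+'::pvC u' := by
              unfold pvC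
              rw [show ('i'::'P'::'h'::'o'::'n'::'e'::'r'::'o'::'l'::'u'::'s'::u')
                    = ['i','P','h','o','n','e'] ++ ('r'::'o'::'l'::'u'::'s'::u') from rfl,
                  pvRep_pos ['i','P','h','o','n','e'] ['I','P'] (by simp) ⟨_, rfl⟩, List.drop_left,
                  show ('r'::'o'::'l'::'u'::'s'::u') = ['r','o','l','u','s'] ++ u' from rfl,
                  pvRep_skip ['i','P','h','o','n','e'] ['I','P'] 'i' rfl ['r','o','l','u','s'] u' (by simp)]
              simp only [List.cons_append, List.nil_append]
              set X := pvRep ['i','P','h','o','n','e'] ['I','P'] u' with hX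
              rw [pvRep_neg _ _ (show ¬ (['P','r','o','M','a','x'] <+: 'I'::'P'::'r'::'o'::'l'::'u'::'s'::X) by
                    simp [List.cons_prefix_cons]),
                  pvRep_neg _ _ (show ¬ (['P','r','o','M','a','x'] <+: 'P'::'r'::'o'::'l'::'u'::'s'::X) by
                    simp [List.cons_prefix_cons]),
                  show ('r'::'o'::'l'::'u'::'s'::X) = ['r','o','l','u','s'] ++ X from rfl,
                  pvRep_skip ['P','r','o','M','a','x'] ['P','M'] 'P' rfl ['r','o','l','u','s'] X (by simp)]
              simp only [List.cons_append, List.nil_append]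
              set Y := pvRep ['P','r','o','M','a','x'] ['P','M'] X with hY
              rw [pvRep_neg _ _ (show ¬ (['P','r','o'] <+: 'I'::'P'::'r'::'o'::'l'::'u'::'s'::Y) by
                    simp [List.cons_prefix_cons]),
                  show ('P'::'r'::'o'::'l'::'u'::'s'::Y) = ['P','r','o'] ++ ('l'::'u'::'s'::Y) from rfl,
                  pvRep_pos ['P','r','o'] ['P'] (by simp) ⟨_, rfl⟩, List.drop_left,
                  show ('l'::'u'::'s'::Y) = ['l','u','s'] ++ Y from rfl,
                  pvRep_skip ['P','r','o'] ['P'] 'P' rfl ['l','u','s'] Y (by simp)]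
              simp only [List.cons_append, List.nil_append]
              set Z := pvRep ['P','r','o'] ['P'] Y with hZ
              rw [pvRep_neg _ _ (show ¬ (['P','l','u','s'] <+: 'I'::'P'::'l'::'u'::'s'::Z) by
                    simp [List.cons_prefix_cons]),
                  show ('P'::'l'::'u'::'s'::Z) = ['P','l','u','s'] ++ Z from rfl,
                  pvRep_pos ['P','l','u','s'] ['+'] (by simp) ⟨_, rfl⟩, List.drop_left]
              simp
            have h1 : pvScanF ((5 + m') + 1) ('i'::'P'::'h'::'o'::'n'::'e'::'r'::'o'::'l'::'u'::'s'::u')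
                = 'I'::'P'::pvScanF (5 + m') ('r'::'o'::'l'::'u'::'s'::u') := by
              simp [pvScanF, PySem.Chars.startswith, pvEiPhone, pvEIP, List.isPrefixOf]
            have h2 := pvScanCopy ['r','o','l','u','s'] (by simp) m' u'
            simp only [List.length_cons, List.length_nil, List.cons_append, List.nil_append] at h2
            rw [eC, h1, h2]
            simp only [List.length_cons]
            have := (ih m' (by omega) u' (by simp at hw; omega)).1
            omega
          · -- the created 'Pro' fires: A gives 'IP', B gives 'IPro'
            obtain ⟨m', rfl⟩ : ∃ m', n = (2 + m') + 1 := ⟨n - 3, by simp at hw; omega⟩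
            have eC : pvC ('i'::'P'::'h'::'o'::'n'::'e'::'r'::'o'::u) = 'I'::'P'::pvC u := by
              unfold pvC
              rw [show ('i'::'P'::'h'::'o'::'n'::'e'::'r'::'o'::u)
                    = ['i','P','h','o','n','e'] ++ ('r'::'o'::u) from rfl,
                  pvRep_pos ['i','P','h','o','n','e'] ['I','P'] (by simp) ⟨_, rfl⟩, List.drop_left,
                  show ('r'::'o'::u) = ['r','o'] ++ u from rfl,
                  pvRep_skip ['i','P','h','o','n','e'] ['I','P'] 'i' rfl ['r','o'] u (by simp)]
              simp only [List.cons_append, List.nil_append]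
              set X := pvRep ['i','P','h','o','n','e'] ['I','P'] u with hX
              have hXMax : ¬ (['M','a','x'] <+: X) := fun h => hMax ((pvP1 _ _ (by simp)).mp h)
              have hXlus : ¬ (['l','u','s'] <+: X) := fun h => hlus ((pvP1 _ _ (by simp)).mp h)
              rw [pvRep_neg _ _ (show ¬ (['P','r','o','M','a','x'] <+: 'I'::'P'::'r'::'o'::X) by
                    simp [List.cons_prefix_cons]),
                  pvRep_neg _ _ (show ¬ (['P','r','o','M','a','x'] <+: 'P'::'r'::'o'::X) from
                    fun h => hXMax (List.cons_prefix_cons.mp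
                      (List.cons_prefix_cons.mp (List.cons_prefix_cons.mp h).2).2).2),
                  pvRep_neg _ _ (show ¬ (['P','r','o','M','a','x'] <+: 'r'::'o'::X) by
                    simp [List.cons_prefix_cons]),
                  pvRep_neg _ _ (show ¬ (['P','r','o','M','a','x'] <+: 'o'::X) by
                    simp [List.cons_prefix_cons])]
              set Y := pvRep ['P','r','o','M','a','x'] ['P','M'] X with hY
              have hYlus : ¬ (['l','u','s'] <+: Y) := fun h => hXlus ((pvP2 _ _ (by simp)).mp h)
              rw [pvRep_neg _ _ (show ¬ (['P','r','o'] <+: 'I'::'P'::'r'::'o'::Y) by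
                    simp [List.cons_prefix_cons]),
                  show ('P'::'r'::'o'::Y) = ['P','r','o'] ++ Y from rfl,
                  pvRep_pos ['P','r','o'] ['P'] (by simp) ⟨Y, rfl⟩, List.drop_left]
              simp only [List.cons_append, List.nil_append]
              set Z := pvRep ['P','r','o'] ['P'] Y with hZ
              have hZlus : ¬ (['l','u','s'] <+: Z) := fun h => hYlus ((pvP3 _ _ (by simp)).mp h)
              rw [pvRep_neg _ _ (show ¬ (['P','l','u','s'] <+: 'I'::'P'::Z) by
                    simp [List.cons_prefix_cons]),
                  pvRep_neg _ _ (show ¬ (['P','l','u','s'] <+: 'P'::Z) from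
                    fun h => hZlus (List.cons_prefix_cons.mp h).2)]
            have h1 : pvScanF ((2 + m') + 1) ('i'::'P'::'h'::'o'::'n'::'e'::'r'::'o'::u)
                = 'I'::'P'::pvScanF (2 + m') ('r'::'o'::u) := by
              simp [pvScanF, PySem.Chars.startswith, pvEiPhone, pvEIP, List.isPrefixOf]
            have h2 := pvScanCopy ['r','o'] (by simp) m' u
            simp only [List.length_cons, List.length_nil, List.cons_append, List.nil_append] at h2
            rw [eC, h1, h2]
            simp only [List.length_cons]
            have := (ih m' (by omega) u (by simp at hw; omega)).1
            omega
      · by_cases hb2 : pvB2 <+: w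
        · -- 'iPhonelus' at the front: A gives 'I+', B gives 'IPlus'
          obtain ⟨u, rfl⟩ := hb2
          simp only [pvB2, List.cons_append, List.nil_append] at hw ⊢
          obtain ⟨m', rfl⟩ : ∃ m', n = (3 + m') + 1 := ⟨n - 4, by simp at hw; omega⟩
          have eC : pvC ('i'::'P'::'h'::'o'::'n'::'e'::'l'::'u'::'s'::u) = 'I'::'+'::pvC u := by
            unfold pvC
            rw [show ('i'::'P'::'h'::'o'::'n'::'e'::'l'::'u'::'s'::u)
                  = ['i','P','h','o','n','e'] ++ ('l'::'u'::'s'::u) from rfl,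
                pvRep_pos ['i','P','h','o','n','e'] ['I','P'] (by simp) ⟨_, rfl⟩, List.drop_left,
                show ('l'::'u'::'s'::u) = ['l','u','s'] ++ u from rfl,
                pvRep_skip ['i','P','h','o','n','e'] ['I','P'] 'i' rfl ['l','u','s'] u (by simp)]
            simp only [List.cons_append, List.nil_append]
            set X := pvRep ['i','P','h','o','n','e'] ['I','P'] u with hX
            rw [pvRep_neg _ _ (show ¬ (['P','r','o','M','a','x'] <+: 'I'::'P'::'l'::'u'::'s'::X) by
                  simp [List.cons_prefix_cons]),
                pvRep_neg _ _ (show ¬ (['P','r','o','M','a','x'] <+: 'P'::'l'::'u'::'s'::X) by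
                  simp [List.cons_prefix_cons]),
                show ('l'::'u'::'s'::X) = ['l','u','s'] ++ X from rfl,
                pvRep_skip ['P','r','o','M','a','x'] ['P','M'] 'P' rfl ['l','u','s'] X (by simp)]
            simp only [List.cons_append, List.nil_append]
            set Y := pvRep ['P','r','o','M','a','x'] ['P','M'] X with hY
            rw [pvRep_neg _ _ (show ¬ (['P','r','o'] <+: 'I'::'P'::'l'::'u'::'s'::Y) by
                  simp [List.cons_prefix_cons]),
                pvRep_neg _ _ (show ¬ (['P','r','o'] <+: 'P'::'l'::'u'::'s'::Y) by
                  simp [List.cons_prefix_cons]),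
                show ('l'::'u'::'s'::Y) = ['l','u','s'] ++ Y from rfl,
                pvRep_skip ['P','r','o'] ['P'] 'P' rfl ['l','u','s'] Y (by simp)]
            simp only [List.cons_append, List.nil_append]
            set Z := pvRep ['P','r','o'] ['P'] Y with hZ
            rw [pvRep_neg _ _ (show ¬ (['P','l','u','s'] <+: 'I'::'P'::'l'::'u'::'s'::Z) by
                  simp [List.cons_prefix_cons]),
                show ('P'::'l'::'u'::'s'::Z) = ['P','l','u','s'] ++ Z from rfl,
                pvRep_pos ['P','l','u','s'] ['+'] (by simp) ⟨_, rfl⟩, List.drop_left]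
            simp
          have h1 : pvScanF ((3 + m') + 1) ('i'::'P'::'h'::'o'::'n'::'e'::'l'::'u'::'s'::u)
              = 'I'::'P'::pvScanF (3 + m') ('l'::'u'::'s'::u) := by
            simp [pvScanF, PySem.Chars.startswith, pvEiPhone, pvEIP, List.isPrefixOf]
          have h2 := pvScanCopy ['l','u','s'] (by simp) m' u
          simp only [List.length_cons, List.length_nil, List.cons_append, List.nil_append] at h2
          rw [eC, h1, h2]
          simp only [List.length_cons]
          have := (ih m' (by omega) u (by simp at hw; omega)).1
          omega
        · by_cases hb3 : pvB3 <+: w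
          · -- 'Prolus' at the front: A gives '+', B gives 'Plus'
            obtain ⟨u, rfl⟩ := hb3
            simp only [pvB3, List.cons_append, List.nil_append] at hw ⊢
            obtain ⟨m', rfl⟩ : ∃ m', n = (3 + m') + 1 := ⟨n - 4, by simp at hw; omega⟩
            have eC : pvC ('P'::'r'::'o'::'l'::'u'::'s'::u) = '+'::pvC u := by
              unfold pvC
              rw [show ('P'::'r'::'o'::'l'::'u'::'s'::u) = ['P','r','o','l','u','s'] ++ u from rfl,
                  pvRep_skip ['i','P','h','o','n','e'] ['I','P'] 'i' rfl ['P','r','o','l','u','s'] u (by simp)]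
              simp only [List.cons_append, List.nil_append]
              set X := pvRep ['i','P','h','o','n','e'] ['I','P'] u with hX
              rw [pvRep_neg _ _ (show ¬ (['P','r','o','M','a','x'] <+: 'P'::'r'::'o'::'l'::'u'::'s'::X) by
                    simp [List.cons_prefix_cons]),
                  show ('r'::'o'::'l'::'u'::'s'::X) = ['r','o','l','u','s'] ++ X from rfl,
                  pvRep_skip ['P','r','o','M','a','x'] ['P','M'] 'P' rfl ['r','o','l','u','s'] X (by simp)]
              simp only [List.cons_append, List.nil_append]
              set Y := pvRep ['P','r','o','M','a','x'] ['P','M'] X with hY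
              rw [show ('P'::'r'::'o'::'l'::'u'::'s'::Y) = ['P','r','o'] ++ ('l'::'u'::'s'::Y) from rfl,
                  pvRep_pos ['P','r','o'] ['P'] (by simp) ⟨_, rfl⟩, List.drop_left,
                  show ('l'::'u'::'s'::Y) = ['l','u','s'] ++ Y from rfl,
                  pvRep_skip ['P','r','o'] ['P'] 'P' rfl ['l','u','s'] Y (by simp)]
              simp only [List.cons_append, List.nil_append]
              set Z := pvRep ['P','r','o'] ['P'] Y with hZ
              rw [show ('P'::'l'::'u'::'s'::Z) = ['P','l','u','s'] ++ Z from rfl,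
                  pvRep_pos ['P','l','u','s'] ['+'] (by simp) ⟨_, rfl⟩, List.drop_left]
              simp
            have h1 : pvScanF ((3 + m') + 1) ('P'::'r'::'o'::'l'::'u'::'s'::u)
                = 'P'::pvScanF (3 + m') ('l'::'u'::'s'::u) := by
              simp [pvScanF, PySem.Chars.startswith, pvEiPhone, pvEProMax, pvEPro, pvEP,
                List.isPrefixOf]
            have h2 := pvScanCopy ['l','u','s'] (by simp) m' u
            simp only [List.length_cons, List.length_nil, List.cons_append, List.nil_append] at h2
            rw [eC, h1, h2]
            simp only [List.length_cons]
            have := (ih m' (by omega) u (by simp at hw; omega)).1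
            omega
          · -- no pattern at the front: decompose one step and recurse
            have hP0 : ¬ pvP0 w := by rintro (h | h | h); exacts [hb1 h, hb2 h, hb3 h]
            obtain ⟨m, rfl⟩ : ∃ m, n = m + 1 := ⟨n - 1, by omega⟩
            obtain ⟨o, t, hlt, _, hC, hS, tr1, tr2, tr3⟩ := pvDecomp w hne hP0
            have hbt : pvB1 <:+: t ∨ pvB2 <:+: t ∨ pvB3 <:+: t := by
              rcases hbad with h | h | h
              exacts [Or.inl (tr1 h), Or.inr (Or.inl (tr2 h)), Or.inr (Or.inr (tr3 h))]
            have hrec := (ih m (by omega) t (by omega)).2 hbt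
            rw [hC, hS m]
            simp only [List.length_append]
            omega
    refine ⟨?_, hstrict⟩
    by_cases hbad : (pvB1 <:+: w ∨ pvB2 <:+: w ∨ pvB3 <:+: w)
    · exact (hstrict hbad).le
    · rw [pvMain n w hw (fun h => hbad (Or.inl h)) (fun h => hbad (Or.inr (Or.inl h)))
        (fun h => hbad (Or.inr (Or.inr h)))]

theorem simplify_model_name_spec : Claim_unchanged_simplify_model_name := by
  intro size _ hD
  have h1 : ¬ ("iPhonero".toList <:+: (PySem.Str.replace size " " "").toList) := fun h =>
    hD (Or.inl ((PySem.Str.isIn_iff_infix _ _).mpr h))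
  have h2 : ¬ ("iPhonelus".toList <:+: (PySem.Str.replace size " " "").toList) := fun h =>
    hD (Or.inr (Or.inl ((PySem.Str.isIn_iff_infix _ _).mpr h)))
  have h3 : ¬ ("Prolus".toList <:+: (PySem.Str.replace size " " "").toList) := fun h =>
    hD (Or.inr (Or.inr ((PySem.Str.isIn_iff_infix _ _).mpr h)))
  show simplify_model_name size = simplify_model_name_alt size
  unfold simplify_model_name simplify_model_name_alt
  simp only [List.foldl]
  rw [show ∀ (s o nw : String), PySem.Str.replace s o nw =
        String.ofList (PySem.Chars.replace s.toList o.toList nw.toList) from fun _ _ _ => rfl]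
  simp only [PySem.Str.toList_replace]
  apply congrArg
  rw [pvReplace_eq_pvRep "iPhone".toList "IP".toList _ (by decide),
      pvReplace_eq_pvRep "ProMax".toList "PM".toList _ (by decide),
      pvReplace_eq_pvRep "Pro".toList "P".toList _ (by decide),
      pvReplace_eq_pvRep "Plus".toList "+".toList _ (by decide)]
  simp only [PySem.Str.toList_replace] at h1 h2 h3
  exact pvMain _ _ le_rfl h1 h2 h3

theorem simplify_model_name_changed : Claim_changed_simplify_model_name := by
  unfold Claim_changed_simplify_model_name; decide

theorem simplify_model_name_tight : Claim_exact_simplify_model_name := by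
  intro size _ hD heq
  have hl := congrArg String.toList heq
  simp only [simplify_model_name, simplify_model_name_alt, List.foldl,
    PySem.Str.toList_replace, String.toList_ofList] at hl
  rw [pvReplace_eq_pvRep "iPhone".toList "IP".toList _ (by decide),
      pvReplace_eq_pvRep "ProMax".toList "PM".toList _ (by decide),
      pvReplace_eq_pvRep "Pro".toList "P".toList _ (by decide),
      pvReplace_eq_pvRep "Plus".toList "+".toList _ (by decide)] at hl
  have hbad : pvB1 <:+: PySem.Chars.replace size.toList " ".toList "".toList ∨
      pvB2 <:+: PySem.Chars.replace size.toList " ".toList "".toList ∨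
      pvB3 <:+: PySem.Chars.replace size.toList " ".toList "".toList := by
    rcases hD with h | h | h
    · exact Or.inl (by
        have := (PySem.Str.isIn_iff_infix _ _).mp h
        rwa [PySem.Str.toList_replace] at this)
    · exact Or.inr (Or.inl (by
        have := (PySem.Str.isIn_iff_infix _ _).mp h
        rwa [PySem.Str.toList_replace] at this))
    · exact Or.inr (Or.inr (by
        have := (PySem.Str.isIn_iff_infix _ _).mp h
        rwa [PySem.Str.toList_replace] at this))
  have hlen := (pvLenBoth (PySem.Chars.replace size.toList " ".toList "".toList).length
    (PySem.Chars.replace size.toList " ".toList "".toList) le_rfl).2 hbad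
  have hl' : (pvC (PySem.Chars.replace size.toList " ".toList "".toList)).length
      = (pvScanF (PySem.Chars.replace size.toList " ".toList "".toList).length
          (PySem.Chars.replace size.toList " ".toList "".toList)).length := congrArg List.length hl
  omega
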